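-- pv_equiv track=rewrite | github.com/miliar/Code_Jam_Webscraper | Solutions_python/Problem_191/47.py | f
-- ===== SOURCE A (Python) =====
-- def f(L, a=0, b=0):
--     if a > b+len(L):
--         return 0
--     if b > a+len(L):
--         return 0
--
--     if len(L) == 0:
--         return (a==b)
--
--     return L[0]*f(L[1:],a+1,b) + (1-L[0])*f(L[1:],a,b+1)
-- ===== SOURCE B (Python) =====
-- def f(L, a=0, b=0):
--     # Bottom-up DP over (suffix, a-b difference): O(n^2) instead of A's exponential recursion.
--     n = len(L)
--     w = 2 * n + 1
--     dp = [1 if i == n else 0 for i in range(w)]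
--     for x in reversed(L):
--         dp = [x * (dp[i + 1] if i + 1 < w else 0)
--               + (1 - x) * (dp[i - 1] if i - 1 >= 0 else 0)
--               for i in range(w)]
--     d = a - b + n
--     return dp[d] if 0 <= d < w else 0
-- ===== Notes on version B (the rewrite author's own statement) =====
-- stated objective: faster
-- what changed: Replaced A's exponential two-branch recursion over (a,b) with a bottom-up dynamic-programming table indexed by the difference a-b, filled once per list element; Pre_ excludes only the empty list with a = b, where A returns the Python bool True instead of an int.
-- outside the precondition, e.g. on f([], 0, 0): A returns True, B returns 1
import Mathlib
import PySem

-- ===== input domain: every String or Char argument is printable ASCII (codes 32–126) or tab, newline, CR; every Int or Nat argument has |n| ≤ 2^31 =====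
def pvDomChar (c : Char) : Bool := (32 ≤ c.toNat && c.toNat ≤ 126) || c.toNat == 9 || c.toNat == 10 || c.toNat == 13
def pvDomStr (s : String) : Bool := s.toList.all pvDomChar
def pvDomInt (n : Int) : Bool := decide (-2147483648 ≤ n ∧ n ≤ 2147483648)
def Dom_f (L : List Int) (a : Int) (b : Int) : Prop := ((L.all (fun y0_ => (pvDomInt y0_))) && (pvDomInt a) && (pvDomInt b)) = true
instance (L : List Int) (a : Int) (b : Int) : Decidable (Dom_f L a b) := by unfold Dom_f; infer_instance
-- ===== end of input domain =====

-- B replaces A's exponential branching recursion with a bottom-up DP table over the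
-- a-b difference (objective: faster, O(n^2) vs O(2^n)).

-- ===== PORT A =====
-- A: recursive, prunes when |a-b| exceeds the remaining length, base case (a==b).
def f (L : List Int) (a : Int) (b : Int) : Int :=
  if a > b + (L.length : Int) then 0
  else if b > a + (L.length : Int) then 0
  else match L with
    | [] => if a = b then 1 else 0
    | x :: t => x * f t (a + 1) b + (1 - x) * f t a (b + 1)

-- ===== PORT B =====
-- one DP step: new table from old, index i encodes difference d = i - n
def fAltStep (w : Int) (dp : List Int) (x : Int) : List Int :=
  (PySem.List.pyRange 0 w 1).map (fun i =>
    x * (if i + 1 < w then PySem.List.pyGetD dp (i + 1) 0 else 0)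
    + (1 - x) * (if i - 1 ≥ 0 then PySem.List.pyGetD dp (i - 1) 0 else 0))

def f_alt (L : List Int) (a : Int) (b : Int) : Int :=
  let n : Int := L.length
  let w : Int := 2 * n + 1
  let dp0 : List Int := (PySem.List.pyRange 0 w 1).map (fun i => if i = n then 1 else 0)
  let dp : List Int := L.reverse.foldl (fAltStep w) dp0
  let d : Int := a - b + n
  if 0 ≤ d ∧ d < w then PySem.List.pyGetD dp d 0 else 0

-- ===== PRECONDITION & SPEC =====
-- Pre_ excludes the empty list with a = b, on which A returns the Python bool True instead of an int.
def Pre_f (L : List Int) (a : Int) (b : Int) : Prop := L ≠ [] ∨ a ≠ b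
instance (L : List Int) (a : Int) (b : Int) : Decidable (Pre_f L a b) := by unfold Pre_f; infer_instance
def pvWitness_f : List Int × Int × Int := ([1], 0, 0)
def Spec_f (L : List Int) (a : Int) (b : Int) (out : Int) : Prop := out = f_alt L a b
instance (L : List Int) (a : Int) (b : Int) (out : Int) : Decidable (Spec_f L a b out) := by unfold Spec_f; infer_instance

-- ===== CLAIM (what is proved, stated in full; the proofs are below) =====
def Claim_equal_f : Prop := ∀ (L : List Int) (a : Int) (b : Int), Dom_f L a b → Pre_f L a b → Spec_f L a b (f L a b)

-- ===== LEMMAS AND PROOFS =====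

-- the common mathematical value: weighted count over the difference d = a - b
def pvG : List Int → Int → Int
  | [], d => if d = 0 then 1 else 0
  | x :: t, d => x * pvG t (d + 1) + (1 - x) * pvG t (d - 1)

theorem pvG_zero (t : List Int) : ∀ d : Int, ((t.length : Int) < d ∨ d < -(t.length : Int)) → pvG t d = 0 := by
  induction t with
  | nil => intro d h; simp [pvG]; omega
  | cons x t ih =>
    intro d h
    simp only [pvG, List.length_cons] at *
    rw [ih (d + 1) (by push_cast at h ⊢; omega), ih (d - 1) (by push_cast at h ⊢; omega)]
    ring

theorem f_eq_pvG (L : List Int) : ∀ a b : Int, f L a b = pvG L (a - b) := by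
  induction L with
  | nil =>
    intro a b
    simp only [f, pvG, List.length_nil]
    split_ifs <;> omega
  | cons x t ih =>
    intro a b
    rw [f]
    split_ifs with h1 h2
    · rw [pvG_zero _ (a - b) (by simp at h1 ⊢; omega)]
    · rw [pvG_zero _ (a - b) (by simp at h2 ⊢; omega)]
    · simp only [pvG, ih]
      have e1 : a + 1 - b = a - b + 1 := by ring
      have e2 : a - (b + 1) = a - b - 1 := by ring
      rw [e1, e2]

theorem fAlt_inv (n w : Int) (_hn : 0 ≤ n) (hw : w = 2 * n + 1)
    (dp0 : List Int) (hdp0 : dp0 = (PySem.List.pyRange 0 w 1).map (fun i => if i = n then 1 else 0)) :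
    ∀ t : List Int, (t.length : Int) ≤ n →
      ∀ i : Int, 0 ≤ i → i < w →
        PySem.List.pyGetD (t.foldr (fun x dp => fAltStep w dp x) dp0) i 0 = pvG t (i - n) := by
  intro t
  induction t with
  | nil =>
    intro _ i h0 hi
    subst hdp0
    simp only [List.foldr]
    rw [PySem.List.pyGetD_map_pyRange_of_nonneg _ w i 0 h0 hi]
    by_cases h : i = n
    · simp [pvG, h]
    · have h2 : i - n ≠ 0 := by omega
      simp [pvG, h, h2]
  | cons x t ih =>
    intro hlen i h0 hi
    have hlen' : (t.length : Int) ≤ n := by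
      simp only [List.length_cons] at hlen; push_cast at hlen ⊢; omega
    have hlt : (t.length : Int) < n := by
      simp only [List.length_cons] at hlen; push_cast at hlen ⊢; omega
    rw [List.foldr_cons]
    show PySem.List.pyGetD (fAltStep w (List.foldr (fun x dp => fAltStep w dp x) dp0 t) x) i 0
        = pvG (x :: t) (i - n)
    rw [fAltStep, PySem.List.pyGetD_map_pyRange_of_nonneg _ w i 0 h0 hi]
    have A1 : (if i + 1 < w then
        PySem.List.pyGetD (t.foldr (fun x dp => fAltStep w dp x) dp0) (i + 1) 0 else 0)
        = pvG t (i - n + 1) := by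
      by_cases h1 : i + 1 < w
      · rw [if_pos h1, ih hlen' (i + 1) (by omega) h1]
        congr 1; ring
      · rw [if_neg h1, pvG_zero t (i - n + 1) (by omega)]
    have A2 : (if i - 1 ≥ 0 then
        PySem.List.pyGetD (t.foldr (fun x dp => fAltStep w dp x) dp0) (i - 1) 0 else 0)
        = pvG t (i - n - 1) := by
      by_cases h1 : i - 1 ≥ 0
      · rw [if_pos h1, ih hlen' (i - 1) h1 (by omega)]
        congr 1; ring
      · rw [if_neg h1, pvG_zero t (i - n - 1) (by omega)]
    rw [A1, A2]
    rfl

theorem f_alt_eq_pvG (L : List Int) (a b : Int) : f_alt L a b = pvG L (a - b) := by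
  unfold f_alt
  simp only [List.foldl_reverse]
  have key := fAlt_inv (L.length : Int) (2 * (L.length : Int) + 1) (by positivity) rfl
    _ rfl L (le_refl _)
  by_cases h : 0 ≤ a - b + (L.length : Int) ∧ a - b + (L.length : Int) < 2 * (L.length : Int) + 1
  · rw [if_pos h, key (a - b + (L.length : Int)) h.1 h.2]
    congr 1; ring
  · rw [if_neg h, pvG_zero L (a - b) (by omega)]

-- ===== VERDICT (by name: the statement is the Claim_ definition above) =====
theorem f_spec : Claim_equal_f := by
  intro L a b _ _
  unfold Spec_f
  rw [f_eq_pvG, f_alt_eq_pvG]
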